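-- pv_equiv track=rewrite | github.com/Tomee0818/knock100 | chapter3/knock023.py | ex_section
-- ===== SOURCE A (Python) =====
-- def ex_section(data):
--     rank = -1
--     ex_comp = 0
--     section_name = ""
--     section_list = []
--
--     line = data.split('\n')
--
--     for i in range(len(line)):
--         if '==' in line[i]:
--             for j in range(len(line[i])):
--                 if line[i][j] == '=' and ex_comp == 0:
--                     rank += 1
--                 elif line[i][j] == '=' and ex_comp == 1:
--                     section_list.append([section_name, rank])
--                     rank = -1
--                     ex_comp = 0
--                     section_name = ""
--                     break
--                 else:
--                     section_name += line[i][j]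
--                     ex_comp = 1
--
--     return section_list
-- ===== SOURCE B (Python) =====
-- def ex_section(data):
--     # Return-value equivalent to A; keeps A's cross-line parser state but
--     # replaces the char-by-char inner loop with lstrip/find string operations.
--     out = []
--     rank, name, pending = -1, "", False
--     for line in data.split('\n'):
--         if '==' not in line:
--             continue
--         if pending:
--             rest = line
--         else:
--             rest = line.lstrip('=')
--             rank += len(line) - len(rest)
--             if not rest:
--                 continue
--         idx = rest.find('=')
--         if idx == -1:
--             name += rest
--             pending = True
--         else:
--             out.append([name + rest[:idx], rank])
--             rank, name, pending = -1, "", False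
--     return out
-- ===== Notes on version B (the rewrite author's own statement) =====
-- stated objective: simpler
-- what changed: A's char-by-char inner state machine (ex_comp flag, per-character rank increments, break) is replaced by per-line string operations: an lstrip of leading equals signs counted into rank and a find of the next equals sign to cut the section name, while keeping the same cross-line parser state.
import Mathlib
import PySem

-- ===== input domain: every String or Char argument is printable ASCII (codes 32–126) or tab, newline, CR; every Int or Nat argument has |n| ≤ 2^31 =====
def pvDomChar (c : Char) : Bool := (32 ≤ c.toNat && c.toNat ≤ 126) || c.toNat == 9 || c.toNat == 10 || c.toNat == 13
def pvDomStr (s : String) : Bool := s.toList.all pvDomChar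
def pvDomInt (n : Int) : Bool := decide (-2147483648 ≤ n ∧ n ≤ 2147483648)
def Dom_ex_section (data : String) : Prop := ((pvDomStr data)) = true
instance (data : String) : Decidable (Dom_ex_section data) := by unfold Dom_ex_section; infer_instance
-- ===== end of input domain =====

-- B replaces A's char-by-char inner state machine with lstrip/find string operations
-- (same cross-line parser state, same return value); objective: simpler.

-- ===== PORT A =====
-- inner 'for j in range(len(line[i]))' loop of A: structural recursion over the line's
-- characters carrying (rank, ex_comp, section_name, section_list); the 'break' branch
-- returns without recursing.
def exAInner : List Char → Int → Int → List Char → List (String × Int) →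
    Int × Int × List Char × List (String × Int)
  | [], rank, exComp, name, acc => (rank, exComp, name, acc)
  | c :: cs, rank, exComp, name, acc =>
    if c = '=' ∧ exComp = 0 then exAInner cs (rank + 1) exComp name acc
    else if c = '=' ∧ exComp = 1 then (-1, 0, [], acc ++ [(String.ofList name, rank)])
    else exAInner cs rank 1 (name ++ [c]) acc

-- outer 'for i in range(len(line))' loop of A over the split lines
def exAOuter : List (List Char) → Int → Int → List Char → List (String × Int) →
    List (String × Int)
  | [], _, _, _, acc => acc
  | l :: ls, rank, exComp, name, acc =>
    if PySem.Chars.isIn ['=', '='] l then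
      let s := exAInner l rank exComp name acc
      exAOuter ls s.1 s.2.1 s.2.2.1 s.2.2.2
    else exAOuter ls rank exComp name acc

def ex_section (data : String) : List (String × Int) :=
  exAOuter (((PySem.Str.split? data "\n").getD []).map String.toList) (-1) 0 [] []

-- ===== PORT B =====
-- body of Source B's loop after 'rest' is known to be non-empty (the 'idx = rest.find(=)' part);
-- returns the new (rank, name, pending, out) state.
-- rest[:idx] with 0 ≤ idx is ported as PySem.List.slice rest none (some idx).
def exBFind (rest : List Char) (rank : Int) (name : List Char) (out : List (String × Int)) :
    Int × List Char × Bool × List (String × Int) :=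
  let idx := PySem.Chars.find rest ['=']
  if idx = -1 then (rank, name ++ rest, true, out)
  else (-1, [], false, out ++ [(String.ofList (name ++ PySem.List.slice rest none (some idx)), rank)])

-- one iteration of Source B's loop on a line already known to contain '=='.
-- line.lstrip('=') is ported as dropWhile (· = '='), exact for the single strip char '='.
def exBLine (line : List Char) (rank : Int) (name : List Char) (pending : Bool)
    (out : List (String × Int)) : Int × List Char × Bool × List (String × Int) :=
  if pending then exBFind line rank name out
  else
    let rest := line.dropWhile (· = '=')
    let rank' := rank + ((line.length : Int) - (rest.length : Int))
    if rest = [] then (rank', name, false, out)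
    else exBFind rest rank' name out

-- Source B's 'for line in data.split('\n')' loop
def exBOuter : List (List Char) → Int → List Char → Bool → List (String × Int) →
    List (String × Int)
  | [], _, _, _, out => out
  | l :: ls, rank, name, pending, out =>
    if PySem.Chars.isIn ['=', '='] l then
      let s := exBLine l rank name pending out
      exBOuter ls s.1 s.2.1 s.2.2.1 s.2.2.2
    else exBOuter ls rank name pending out

def ex_section_alt (data : String) : List (String × Int) :=
  exBOuter (((PySem.Str.split? data "\n").getD []).map String.toList) (-1) [] false []

-- ===== PRECONDITION & SPEC =====
def Spec_ex_section (data : String) (out : List (String × Int)) : Prop := out = ex_section_alt data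
instance (data : String) (out : List (String × Int)) : Decidable (Spec_ex_section data out) := by unfold Spec_ex_section; infer_instance

-- ===== CLAIM (what is proved, stated in full; the proofs are below) =====
def Claim_equal_ex_section : Prop := ∀ (data : String), Dom_ex_section data → Spec_ex_section data (ex_section data)

-- ===== LEMMAS AND PROOFS =====

-- [a] is a prefix of l iff l starts with a
lemma prefix_singleton_iff (a : Char) (l : List Char) : [a] <+: l ↔ ∃ t, l = a :: t := by
  cases l with
  | nil => simp
  | cons c t =>
    constructor
    · rintro ⟨u, hu⟩
      simp only [List.singleton_append] at hu
      exact ⟨u, hu.symm⟩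
    · rintro ⟨u, hu⟩
      rw [hu]
      exact ⟨u, rfl⟩

-- [a] is an infix of l iff a occurs in l
lemma infix_singleton_iff (a : Char) (l : List Char) : [a] <:+: l ↔ a ∈ l := by
  constructor
  · intro h
    simpa using h.sublist.subset (by simp)
  · intro h
    obtain ⟨s, t, rfl⟩ := List.append_of_mem h
    exact ⟨s, t, by simp⟩

lemma find_single_nil : PySem.Chars.find [] ['='] = -1 := by
  rw [PySem.Chars.find_eq_neg_one_iff]
  simp

-- recursion law for s.find('=') on a cons
lemma find_single_cons (c : Char) (cs : List Char) :
    PySem.Chars.find (c :: cs) ['='] =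
      if c = '=' then 0
      else if PySem.Chars.find cs ['='] = -1 then -1
      else PySem.Chars.find cs ['='] + 1 := by
  by_cases hc : c = '='
  · subst hc
    have hin : ['='] <:+: ('=' :: cs) := (infix_singleton_iff _ _).mpr (by simp)
    have hne : PySem.Chars.find ('=' :: cs) ['='] ≠ -1 :=
      (PySem.Chars.find_ne_neg_one_iff _ _).mpr hin
    have hge : -1 ≤ PySem.Chars.find ('=' :: cs) ['='] := PySem.Chars.neg_one_le_find _ _
    have h0 : 0 ≤ PySem.Chars.find ('=' :: cs) ['='] := by omega
    obtain ⟨hpre, hmin⟩ := PySem.Chars.find_spec h0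
    have hz : (PySem.Chars.find ('=' :: cs) ['=']).toNat = 0 := by
      by_contra hnz
      exact hmin 0 (Nat.pos_of_ne_zero hnz) ((prefix_singleton_iff _ _).mpr ⟨cs, rfl⟩)
    rw [if_pos rfl]
    omega
  · by_cases h1 : PySem.Chars.find cs ['='] = -1
    · have hout : '=' ∉ cs := by
        rw [PySem.Chars.find_eq_neg_one_iff, infix_singleton_iff] at h1; exact h1
      rw [if_neg hc, if_pos h1, PySem.Chars.find_eq_neg_one_iff, infix_singleton_iff]
      simp [Ne.symm hc, hout]
    · have hgecs : -1 ≤ PySem.Chars.find cs ['='] := PySem.Chars.neg_one_le_find _ _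
      have h0cs : 0 ≤ PySem.Chars.find cs ['='] := by omega
      obtain ⟨hpre, hmin⟩ := PySem.Chars.find_spec h0cs
      have hmemcs : '=' ∈ cs := by
        have := (PySem.Chars.find_ne_neg_one_iff _ _).mp h1
        exact (infix_singleton_iff _ _).mp this
      have hin : ['='] <:+: (c :: cs) := (infix_singleton_iff _ _).mpr (by simp [hmemcs])
      have hne : PySem.Chars.find (c :: cs) ['='] ≠ -1 :=
        (PySem.Chars.find_ne_neg_one_iff _ _).mpr hin
      have hge : -1 ≤ PySem.Chars.find (c :: cs) ['='] := PySem.Chars.neg_one_le_find _ _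
      have h0 : 0 ≤ PySem.Chars.find (c :: cs) ['='] := by omega
      obtain ⟨hpre2, hmin2⟩ := PySem.Chars.find_spec h0
      set n := (PySem.Chars.find cs ['=']).toNat with hn
      set m := (PySem.Chars.find (c :: cs) ['=']).toNat with hm
      have hm0 : m ≠ 0 := by
        intro h
        rw [h, List.drop_zero] at hpre2
        obtain ⟨t, ht⟩ := (prefix_singleton_iff _ _).mp hpre2
        simp only [List.cons.injEq] at ht
        exact hc ht.1
      have hle : m ≤ n + 1 := by
        by_contra hgt
        exact hmin2 (n + 1) (by omega) (by rw [List.drop_succ_cons]; exact hpre)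
      have hge2 : n + 1 ≤ m := by
        by_contra hlt
        obtain ⟨k, hk⟩ := Nat.exists_eq_succ_of_ne_zero hm0
        have hdrop : (c :: cs).drop m = cs.drop (m - 1) := by
          rw [hk, List.drop_succ_cons]
          congr 1
        rw [hdrop] at hpre2
        exact hmin (m - 1) (by omega) hpre2

      rw [if_neg hc, if_neg h1]
      omega

lemma mem_of_isIn_eqeq (l : List Char) (h : PySem.Chars.isIn ['=', '='] l = true) : '=' ∈ l := by
  rw [PySem.Chars.isIn_iff_infix] at h
  exact h.sublist.subset (by simp)

-- A's inner loop with ex_comp = 1 computed by find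
lemma aInner_pending (cs : List Char) : ∀ (r : Int) (nm : List Char) (acc : List (String × Int)),
    exAInner cs r 1 nm acc =
      if PySem.Chars.find cs ['='] = -1 then (r, 1, nm ++ cs, acc)
      else (-1, 0, [], acc ++ [(String.ofList (nm ++ cs.take (PySem.Chars.find cs ['=']).toNat), r)]) := by
  induction cs with
  | nil => intro r nm acc; simp [exAInner, find_single_nil]
  | cons c cs ih =>
    intro r nm acc
    by_cases hc : c = '='
    · subst hc
      simp [exAInner, find_single_cons]
    · have hstep : exAInner (c :: cs) r 1 nm acc = exAInner cs r 1 (nm ++ [c]) acc := by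
        simp [exAInner, hc]
      rw [hstep, ih, find_single_cons, if_neg hc]
      by_cases h1 : PySem.Chars.find cs ['='] = -1
      · simp [h1]
      · have hgecs : -1 ≤ PySem.Chars.find cs ['='] := PySem.Chars.neg_one_le_find _ _
        have h0cs : 0 ≤ PySem.Chars.find cs ['='] := by omega
        have hne : PySem.Chars.find cs ['='] + 1 ≠ -1 := by omega
        have htn : (PySem.Chars.find cs ['='] + 1).toNat = (PySem.Chars.find cs ['=']).toNat + 1 := by
          omega
        simp only [if_neg h1, if_neg hne, htn, List.take_succ_cons]
        simp

-- A's inner loop with ex_comp = 0, empty name: strip the leading '='s into rank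
lemma aInner_strip (cs : List Char) : ∀ (r : Int) (acc : List (String × Int)),
    exAInner cs r 0 [] acc =
      exAInner (cs.dropWhile (· = '='))
        (r + ((cs.length : Int) - ((cs.dropWhile (· = '=')).length : Int))) 0 [] acc := by
  induction cs with
  | nil => intro r acc; simp [List.dropWhile]
  | cons c cs ih =>
    intro r acc
    by_cases hc : c = '='
    · subst hc
      have hstep : exAInner ('=' :: cs) r 0 [] acc = exAInner cs (r + 1) 0 [] acc := by
        simp [exAInner]
      have hdw : ('=' :: cs).dropWhile (· = '=') = cs.dropWhile (· = '=') := by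
        simp [List.dropWhile]
      have hlen : ((cs.dropWhile (· = '=')).length : Int) ≤ (cs.length : Int) := by
        exact_mod_cast List.length_dropWhile_le _ _
      have harith : r + 1 + ((cs.length : Int) - ((cs.dropWhile (· = '=')).length : Int)) =
          r + ((('=' :: cs).length : Int) - ((cs.dropWhile (· = '=')).length : Int)) := by
        simp; omega
      rw [hstep, ih, hdw, harith]
    · have hdw : (c :: cs).dropWhile (· = '=') = c :: cs := by
        simp [List.dropWhile, hc]
      rw [hdw]
      simp

-- once the head is not '=', ex_comp 0 and 1 behave alike on an empty name
lemma aInner_flag (c : Char) (cs : List Char) (r : Int) (acc : List (String × Int))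
    (hc : c ≠ '=') : exAInner (c :: cs) r 0 [] acc = exAInner (c :: cs) r 1 [] acc := by
  simp [exAInner, hc]

-- head of dropWhile (· = '=') is not '='
lemma dropWhile_head_ne (l : List Char) (c : Char) (cs : List Char)
    (h : l.dropWhile (· = '=') = c :: cs) : ¬ c = '=' := by
  induction l with
  | nil => simp [List.dropWhile] at h
  | cons a as ih =>
    by_cases ha : a = '='
    · rw [List.dropWhile_cons_of_pos (by simp [ha])] at h
      exact ih h
    · rw [List.dropWhile_cons_of_neg (by simp [ha])] at h
      injection h with h1 _
      rw [← h1]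
      exact ha

-- main loop correspondence: ex_comp 1 ↔ pending, ex_comp 0 forces empty name
lemma outer_eq (ls : List (List Char)) :
    ∀ (r : Int) (nm : List Char) (ex : Int) (acc : List (String × Int)),
    ((ex = 0 ∧ nm = []) ∨ ex = 1) →
    exAOuter ls r ex nm acc = exBOuter ls r nm (ex == 1) acc := by
  induction ls with
  | nil => intro r nm ex acc _; simp [exAOuter, exBOuter]
  | cons l ls ih =>
    intro r nm ex acc h
    by_cases hl : PySem.Chars.isIn ['=', '='] l = true
    · have hmem := mem_of_isIn_eqeq l hl
      have hfindl : PySem.Chars.find l ['='] ≠ -1 := by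
        rw [PySem.Chars.find_ne_neg_one_iff, infix_singleton_iff]; exact hmem
      rcases h with ⟨hex, hnm⟩ | hex
      · subst hex; subst hnm
        have hA : exAOuter (l :: ls) r 0 [] acc =
            exAOuter ls (exAInner l r 0 [] acc).1 (exAInner l r 0 [] acc).2.1
              (exAInner l r 0 [] acc).2.2.1 (exAInner l r 0 [] acc).2.2.2 := by
          simp [exAOuter, hl]
        have hB : exBOuter (l :: ls) r [] ((0 : Int) == 1) acc =
            exBOuter ls (exBLine l r [] false acc).1 (exBLine l r [] false acc).2.1
              (exBLine l r [] false acc).2.2.1 (exBLine l r [] false acc).2.2.2 := by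
          simp [exBOuter, hl]
        rw [hA, hB, aInner_strip]
        cases hrest : l.dropWhile (· = '=') with
        | nil =>
          have hBL : exBLine l r [] false acc =
              (r + ((l.length : Int) - (([] : List Char).length : Int)), [], false, acc) := by
            simp [exBLine, hrest]
          rw [hBL]
          exact ih _ _ _ _ (Or.inl ⟨rfl, rfl⟩)
        | cons c cs =>
          have hc : ¬ c = '=' := dropWhile_head_ne l c cs hrest
          rw [aInner_flag _ _ _ _ hc, aInner_pending]
          by_cases hf : PySem.Chars.find (c :: cs) ['='] = -1
          · rw [if_pos hf]
            have hBL : exBLine l r [] false acc =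
                (r + ((l.length : Int) - ((c :: cs).length : Int)), [] ++ (c :: cs), true, acc) := by
              simp [exBLine, exBFind, hrest, hf]
            rw [hBL]
            exact ih _ _ _ _ (Or.inr rfl)
          · rw [if_neg hf]
            have h0 : 0 ≤ PySem.Chars.find (c :: cs) ['='] := by
              have := PySem.Chars.neg_one_le_find (c :: cs) ['=']; omega
            have hBL : exBLine l r [] false acc =
                (-1, [], false, acc ++ [(String.ofList
                  ([] ++ (c :: cs).take (PySem.Chars.find (c :: cs) ['=']).toNat),
                  r + ((l.length : Int) - ((c :: cs).length : Int)))]) := by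
              simp [exBLine, exBFind, hrest, hf, PySem.List.slice_to _ h0]
            rw [hBL]
            exact ih _ _ _ _ (Or.inl ⟨rfl, rfl⟩)
      · subst hex
        have hA : exAOuter (l :: ls) r 1 nm acc =
            exAOuter ls (exAInner l r 1 nm acc).1 (exAInner l r 1 nm acc).2.1
              (exAInner l r 1 nm acc).2.2.1 (exAInner l r 1 nm acc).2.2.2 := by
          simp [exAOuter, hl]
        have hB : exBOuter (l :: ls) r nm ((1 : Int) == 1) acc =
            exBOuter ls (exBFind l r nm acc).1 (exBFind l r nm acc).2.1
              (exBFind l r nm acc).2.2.1 (exBFind l r nm acc).2.2.2 := by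
          simp [exBOuter, exBLine, hl]
        have h0 : 0 ≤ PySem.Chars.find l ['='] := by
          have := PySem.Chars.neg_one_le_find l ['=']; omega
        rw [hA, hB, aInner_pending, if_neg hfindl]
        have hBF : exBFind l r nm acc =
            (-1, [], false, acc ++ [(String.ofList
              (nm ++ l.take (PySem.Chars.find l ['=']).toNat), r)]) := by
          simp [exBFind, if_neg hfindl, PySem.List.slice_to _ h0]
        rw [hBF]
        exact ih _ _ _ _ (Or.inl ⟨rfl, rfl⟩)
    · simp only [exAOuter, exBOuter, if_neg hl]
      exact ih _ _ _ _ h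

-- ===== VERDICT (by name: the statement is the Claim_ definition above) =====
theorem ex_section_spec : Claim_equal_ex_section := by
  intro data _
  unfold Spec_ex_section ex_section ex_section_alt
  exact outer_eq _ _ _ _ _ (Or.inl ⟨rfl, rfl⟩)
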